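-- pv_equiv track=rewrite | github.com/LightBruv092/Fundamentos | Taller 2/Taller 2 (Punto 4).py | minimo_multiplicador
-- ===== SOURCE A (Python) =====
-- def minimo_multiplicador(n):
--     m = 1
--     i = 2
--     while i * i <= n:
--         count = 0
--         while n % i == 0:
--             count += 1
--             n //= i
--         if count % 2 != 0:
--             m *= i
--         i += 1
--     if n > 1:
--         m *= n
--     return m
-- ===== SOURCE B (Python) =====
-- def minimo_multiplicador(n):
--     # Divide n by its largest perfect-square divisor (found by a direct
--     # scan for square divisors) instead of factoring and tracking exponent parity.
--     if n <= 1: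
--         return 1
--     best = 1
--     k = 1
--     while k * k <= n:
--         if n % (k * k) == 0:
--             best = k
--         k += 1
--     return n // (best * best)
-- ===== Notes on version B (the rewrite author's own statement) =====
-- stated objective: alternative
-- what changed: B computes the answer as n divided by the largest square divisor of n, found by a single scan over k with k*k <= n, instead of A's trial-division prime factorization tracking exponent parity.
import Mathlib
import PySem

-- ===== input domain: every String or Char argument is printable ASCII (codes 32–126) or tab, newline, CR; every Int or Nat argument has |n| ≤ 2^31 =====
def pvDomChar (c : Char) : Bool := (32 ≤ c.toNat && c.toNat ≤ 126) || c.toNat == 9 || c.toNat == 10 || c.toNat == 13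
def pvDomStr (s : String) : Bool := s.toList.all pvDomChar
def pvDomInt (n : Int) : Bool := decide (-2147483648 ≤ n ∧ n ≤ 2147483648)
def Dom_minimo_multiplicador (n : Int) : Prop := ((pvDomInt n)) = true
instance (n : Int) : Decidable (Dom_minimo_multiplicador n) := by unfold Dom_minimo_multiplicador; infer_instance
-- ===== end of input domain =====

-- B computes the answer as n divided by the largest square divisor of n (found by a
-- direct scan for square divisors) instead of A's trial division tracking exponent parity;
-- objective: alternative (same asymptotic cost, genuinely different algorithm).

-- ===== PORT A =====
-- termination facts cited by the ports' decreasing_by (kept tiny so the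
-- compiled fixpoints stay small)
theorem pv_strip_dec (i n : Int) (h : 0 < n ∧ 2 ≤ i ∧ PySem.Int.mod n i = 0) :
    (PySem.Int.floordiv n i).toNat < n.toNat := by
  obtain ⟨hn, hi, hm⟩ := h
  rw [PySem.Int.floordiv_eq_ediv_of_pos (by omega)]
  have hd : i ∣ n := (PySem.Int.mod_eq_zero_iff_dvd n i).mp hm
  have hq : n / i * i = n := Int.ediv_mul_cancel hd
  have h1 : 0 < n / i := by nlinarith
  have h2 : n / i < n := by nlinarith
  omega

-- inner 'while n % i == 0: count += 1; n //= i' loop of A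
-- (the '0 < n' and '2 ≤ i' guard conjuncts only make the recursion total; they hold
--  whenever Python's code reaches this loop, so the port is exact there)
def mmStrip (i n count : Int) : Int × Int :=
  if h : 0 < n ∧ 2 ≤ i ∧ PySem.Int.mod n i = 0 then
    mmStrip i (PySem.Int.floordiv n i) (count + 1)
  else (count, n)
termination_by n.toNat
decreasing_by exact pv_strip_dec i n h

-- cited by pv_loop_dec below, hence by mmLoop's decreasing_by
theorem mmStrip_snd_le (i n count : Int) : (mmStrip i n count).2 ≤ n := by
  fun_induction mmStrip i n count with
  | case1 n count h ih =>
      obtain ⟨hn, hi, hm⟩ := h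
      have he : PySem.Int.floordiv n i ≤ n := by
        rw [PySem.Int.floordiv_eq_ediv_of_pos (by omega)]
        have hd : i ∣ n := (PySem.Int.mod_eq_zero_iff_dvd n i).mp hm
        have hq : n / i * i = n := Int.ediv_mul_cancel hd
        nlinarith [Int.ediv_nonneg (le_of_lt hn) (by omega : (0:Int) ≤ i)]
      omega
  | case2 n count h => simp

-- outer 'while i * i <= n' loop of A ('2 ≤ i' guard conjunct again only for totality)
theorem pv_loop_dec (n i : Int) (h : 2 ≤ i ∧ i * i ≤ n) :
    ((mmStrip i n 0).2 + 1 - (i + 1)).toNat < (n + 1 - i).toNat := by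
  obtain ⟨hi, hin⟩ := h
  have h1 : (mmStrip i n 0).2 ≤ n := mmStrip_snd_le i n 0
  have h2 : i ≤ n := by nlinarith
  omega

def mmLoop (n i m : Int) : Int :=
  if h : 2 ≤ i ∧ i * i ≤ n then
    let p := mmStrip i n 0
    mmLoop p.2 (i + 1) (if PySem.Int.mod p.1 2 ≠ 0 then m * i else m)
  else if 1 < n then m * n else m
termination_by (n + 1 - i).toNat
decreasing_by exact pv_loop_dec n i h

def minimo_multiplicador (n : Int) : Int := mmLoop n 2 1

-- ===== PORT B =====
-- termination fact cited by bLoop's decreasing_by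
theorem pv_bloop_dec (n k : Int) (h : 1 ≤ k ∧ k * k ≤ n) :
    (n + 1 - (k + 1)).toNat < (n + 1 - k).toNat := by
  obtain ⟨hk, hkn⟩ := h
  have : k ≤ n := by nlinarith
  omega

-- B's 'while k * k <= n' scan for the largest k with k*k dividing n
-- ('1 ≤ k' guard conjunct only for totality; k starts at 1 and increments)
def bLoop (n k best : Int) : Int :=
  if h : 1 ≤ k ∧ k * k ≤ n then
    bLoop n (k + 1) (if PySem.Int.mod n (k * k) = 0 then k else best)
  else best
termination_by (n + 1 - k).toNat
decreasing_by exact pv_bloop_dec n k h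

def minimo_multiplicador_alt (n : Int) : Int :=
  if n ≤ 1 then 1
  else
    let best := bLoop n 1 1
    PySem.Int.floordiv n (best * best)

-- ===== PRECONDITION & SPEC =====
def Spec_minimo_multiplicador (n : Int) (out : Int) : Prop := out = minimo_multiplicador_alt n
instance (n : Int) (out : Int) : Decidable (Spec_minimo_multiplicador n out) := by unfold Spec_minimo_multiplicador; infer_instance

-- ===== CLAIM (what is proved, stated in full; the proofs are below) =====
def Claim_equal_minimo_multiplicador : Prop := ∀ (n : Int), Dom_minimo_multiplicador n → Spec_minimo_multiplicador n (minimo_multiplicador n)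

-- ===== LEMMAS AND PROOFS =====

-- both programs return the unique r with n = k*k*r for some k > 0 and r squarefree
def pvP (n r : Int) : Prop := 0 < r ∧ Squarefree r ∧ ∃ k : Int, 0 < k ∧ k * k * r = n

theorem pvP_unique (n r s : Int) (hr : pvP n r) (hs : pvP n s) : r = s := by
  obtain ⟨hr0, hrsq, k, hk0, hkr⟩ := hr
  obtain ⟨hs0, hssq, l, hl0, hls⟩ := hs
  have hRS : r.natAbs = s.natAbs := by
    have hfr : k.natAbs * k.natAbs * r.natAbs = l.natAbs * l.natAbs * s.natAbs := by
      have : (k * k * r).natAbs = (l * l * s).natAbs := by rw [hkr, hls]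
      simpa [Int.natAbs_mul] using this
    have hk' : k.natAbs ≠ 0 := by omega
    have hr' : r.natAbs ≠ 0 := by omega
    have hl' : l.natAbs ≠ 0 := by omega
    have hs' : s.natAbs ≠ 0 := by omega
    apply Nat.eq_of_factorization_eq' hr' hs'
    ext p
    by_cases hp : p.Prime
    · have h1 := congrArg (fun x => x.factorization p) hfr
      simp only [Nat.factorization_mul (Nat.mul_ne_zero hk' hk') hr',
        Nat.factorization_mul (Nat.mul_ne_zero hl' hl') hs',
        Nat.factorization_mul hk' hk', Nat.factorization_mul hl' hl',
        Finsupp.add_apply] at h1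
      have h2 : r.natAbs.factorization p ≤ 1 :=
        Squarefree.natFactorization_le_one p (Int.squarefree_natAbs.mpr hrsq)
      have h3 : s.natAbs.factorization p ≤ 1 :=
        Squarefree.natFactorization_le_one p (Int.squarefree_natAbs.mpr hssq)
      omega
    · rw [Nat.factorization_eq_zero_of_not_prime _ hp, Nat.factorization_eq_zero_of_not_prime _ hp]
  omega

theorem mmStrip_spec (i n c : Int) : 2 ≤ i → 0 < n →
    ∃ (e : ℕ) (n' : Int), mmStrip i n c = (c + e, n') ∧ i ^ e * n' = n ∧ ¬ i ∣ n' ∧ 0 < n' := by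
  fun_induction mmStrip i n c with
  | case1 n count h ih =>
      intro hi hn
      obtain ⟨-, -, hm⟩ := h
      have hd : i ∣ n := (PySem.Int.mod_eq_zero_iff_dvd n i).mp hm
      have hfe : PySem.Int.floordiv n i = n / i := PySem.Int.floordiv_eq_ediv_of_pos (by omega)
      have hq : n / i * i = n := Int.ediv_mul_cancel hd
      have hqpos : 0 < n / i := by nlinarith
      obtain ⟨e, n', heq, hpow, hnd, hn'⟩ := ih hi (by rw [hfe]; exact hqpos)
      refine ⟨e + 1, n', ?_, ?_, hnd, hn'⟩
      · rw [heq, Prod.mk.injEq]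
        refine ⟨by push_cast; ring, rfl⟩
      · rw [pow_succ]
        rw [hfe] at hpow
        calc i ^ e * i * n' = (i ^ e * n') * i := by ring
          _ = n / i * i := by rw [hpow]
          _ = n := hq
  | case2 n count h =>
      intro hi hn
      refine ⟨0, n, by simp, by simp, ?_, hn⟩
      intro hd
      exact h ⟨hn, hi, (PySem.Int.mod_eq_zero_iff_dvd n i).mpr hd⟩

theorem pv_prime_of_no_small_divisor (n : Int) (hn : 2 ≤ n)
    (h : ∀ j : Int, 2 ≤ j → j * j ≤ n → ¬ j ∣ n) : Prime n := by
  rw [Int.prime_iff_natAbs_prime]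
  by_contra hnp
  obtain ⟨a, had, ha2, halt⟩ := Nat.exists_dvd_of_not_prime2 (by omega) hnp
  have hA : (a : ℤ) ∣ n := by
    have := Int.natCast_dvd_natCast.mpr had
    rwa [Int.natAbs_of_nonneg (by omega)] at this
  obtain ⟨b, hab⟩ := hA
  have hA2 : 2 ≤ (a : ℤ) := by exact_mod_cast ha2
  have hAlt : (a : ℤ) < n := by
    have : a < n.natAbs := halt
    omega
  have hb2 : 2 ≤ b := by nlinarith
  rcases le_total (a : ℤ) b with hle | hle
  · exact h a hA2 (by nlinarith) ⟨b, hab⟩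
  · exact h b hb2 (by nlinarith) ⟨a, by linarith [hab]; ⟩

theorem pv_prime_of_min_divisor (i n : Int) (hi : 2 ≤ i) (hd : i ∣ n)
    (h : ∀ j : Int, 2 ≤ j → j < i → ¬ j ∣ n) : Prime i := by
  rw [Int.prime_iff_natAbs_prime]
  by_contra hnp
  obtain ⟨a, had, ha2, halt⟩ := Nat.exists_dvd_of_not_prime2 (by omega) hnp
  have hA : (a : ℤ) ∣ i := by
    have := Int.natCast_dvd_natCast.mpr had
    rwa [Int.natAbs_of_nonneg (by omega)] at this
  exact h a (by exact_mod_cast ha2) (by omega) (hA.trans hd)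

theorem mmLoop_P (n i m : Int) : 2 ≤ i → 0 < n → (∀ j : Int, 2 ≤ j → j < i → ¬ j ∣ n) →
    ∃ r, pvP n r ∧ mmLoop n i m = m * r := by
  fun_induction mmLoop n i m with
  | case1 n i m h p ih =>
      intro hi hn hinv
      obtain ⟨-, hin⟩ := h
      obtain ⟨e, n', hstrip, hpow, hnd, hn'⟩ := mmStrip_spec i n 0 hi hn
      have hp1 : p.1 = 0 + (e : ℤ) := by rw [show p = (0 + (e:ℤ), n') from hstrip]
      have hp2 : p.2 = n' := by rw [show p = (0 + (e:ℤ), n') from hstrip]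
      rw [hp1, hp2] at ih ⊢
      have hmod : PySem.Int.mod (0 + (e : ℤ)) 2 = (e : ℤ) % 2 := by
        rw [PySem.Int.mod_eq_emod_of_pos (by omega : (0:ℤ) < 2)]; norm_num
      rw [hmod] at ih ⊢
      have hinv' : ∀ j : Int, 2 ≤ j → j < i + 1 → ¬ j ∣ n' := by
        intro j h2 hji hjd
        rcases lt_or_eq_of_le (by omega : j + 1 ≤ i + 1) with hlt | heq
        · exact hinv j h2 (by omega) (hjd.trans ⟨i ^ e, by rw [← hpow]; ring⟩)
        · exact hnd (by rwa [show j = i by omega] at hjd)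
      obtain ⟨r', ⟨hr'0, hr'sq, k', hk'0, hk'⟩, hrec⟩ := ih (by omega) hn' hinv'
      by_cases hpar : e % 2 = 0
      · rw [dif_neg (by omega)] at hrec
        rw [if_neg (by omega), hrec]
        refine ⟨r', ⟨hr'0, hr'sq, i ^ (e / 2) * k', by positivity, ?_⟩, rfl⟩
        have hpw : i ^ (e / 2) * i ^ (e / 2) = i ^ e := by
          rw [← pow_add]; congr 1; omega
        calc i ^ (e / 2) * k' * (i ^ (e / 2) * k') * r'
            = (i ^ (e / 2) * i ^ (e / 2)) * (k' * k' * r') := by ring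
          _ = i ^ e * n' := by rw [hpw, hk']
          _ = n := hpow
      · have hidvd : i ∣ n := by
          refine ⟨i ^ (e - 1) * n', ?_⟩
          rw [← hpow]
          have hie : i ^ e = i * i ^ (e - 1) := by
            conv_lhs => rw [show e = 1 + (e - 1) by omega]
            rw [pow_add, pow_one]
          rw [hie]; ring
        have hiprime : Prime i := pv_prime_of_min_divisor i n hi hidvd hinv
        have hir' : ¬ i ∣ r' := fun hd => hnd (hd.trans ⟨k' * k', by rw [← hk']; ring⟩)
        rw [dif_pos (by omega)] at hrec
        rw [if_pos (by omega), hrec]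
        refine ⟨i * r', ⟨by positivity, ?_, i ^ (e / 2) * k', by positivity, ?_⟩, by ring⟩
        · exact squarefree_mul_iff.mpr
            ⟨((Prime.coprime_iff_not_dvd hiprime).mpr hir').isRelPrime, hiprime.squarefree, hr'sq⟩
        · have hpw : i ^ (e / 2) * i ^ (e / 2) * i = i ^ e := by
            rw [← pow_add, ← pow_succ]; congr 1; omega
          calc i ^ (e / 2) * k' * (i ^ (e / 2) * k') * (i * r')
              = (i ^ (e / 2) * i ^ (e / 2) * i) * (k' * k' * r') := by ring
            _ = i ^ e * n' := by rw [hpw, hk']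
            _ = n := hpow
  | case2 n i m h hn1 =>
      intro hi hn hinv
      have hin : n < i * i := by
        rcases not_and_or.mp h with h1 | h2
        · exact absurd hi h1
        · omega
      have hprime : Prime n := by
        apply pv_prime_of_no_small_divisor n (by omega)
        intro j h2 hjj
        exact hinv j h2 (by nlinarith)
      exact ⟨n, ⟨by omega, hprime.squarefree, 1, by omega, by ring⟩, rfl⟩
  | case3 n i m h hn1 =>
      intro hi hn hinv
      exact ⟨1, ⟨by omega, squarefree_one, 1, by omega, by omega⟩, by omega⟩

theorem bLoop_spec (n k best : Int) : 0 < n → 1 ≤ k → 1 ≤ best → best ≤ k → best * best ∣ n →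
    1 ≤ bLoop n k best ∧ bLoop n k best * bLoop n k best ∣ n ∧ best ≤ bLoop n k best ∧
      ∀ j : Int, k ≤ j → j * j ∣ n → j ≤ bLoop n k best := by
  fun_induction bLoop n k best with
  | case1 k best h ih =>
      intro hn hk hb hbk hd
      obtain ⟨-, hkn⟩ := h
      by_cases hdk : k * k ∣ n
      · rw [dif_pos ((PySem.Int.mod_eq_zero_iff_dvd n (k*k)).mpr hdk)] at ih
        rw [if_pos ((PySem.Int.mod_eq_zero_iff_dvd n (k*k)).mpr hdk)]
        obtain ⟨h1, h2, h3, h4⟩ := ih hn (by omega) hk (by omega) hdk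
        refine ⟨h1, h2, by omega, ?_⟩
        intro j hj hjd
        rcases eq_or_lt_of_le hj with heq | hlt
        · omega
        · exact h4 j (by omega) hjd
      · have hne : ¬ PySem.Int.mod n (k*k) = 0 :=
          fun hm => hdk ((PySem.Int.mod_eq_zero_iff_dvd n (k*k)).mp hm)
        rw [dif_neg hne] at ih
        rw [if_neg hne]
        obtain ⟨h1, h2, h3, h4⟩ := ih hn (by omega) hb (by omega) hd
        refine ⟨h1, h2, h3, ?_⟩
        intro j hj hjd
        rcases eq_or_lt_of_le hj with heq | hlt
        · exact absurd (heq ▸ hjd) hdk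
        · exact h4 j (by omega) hjd
  | case2 k best h =>
      intro hn hk hb hbk hd
      have hkn : n < k * k := by
        rcases not_and_or.mp h with h1 | h2
        · exact absurd hk h1
        · omega
      refine ⟨hb, hd, le_refl best, ?_⟩
      intro j hj hjd
      have h1 : j * j ≤ n := Int.le_of_dvd hn hjd
      nlinarith

theorem alt_P (n : Int) (hn : 2 ≤ n) : pvP n (minimo_multiplicador_alt n) := by
  have hb := bLoop_spec n 1 1 (by omega) (by omega) (by omega) (by omega) (by simp)
  obtain ⟨h1, h2, -, h4⟩ := hb
  set b := bLoop n 1 1 with hbdef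
  have hbb : 0 < b * b := by positivity
  have halt : minimo_multiplicador_alt n = n / (b * b) := by
    rw [minimo_multiplicador_alt, if_neg (by omega)]
    exact PySem.Int.floordiv_eq_ediv_of_pos hbb
  have hq : b * b * (n / (b * b)) = n := Int.mul_ediv_cancel' h2
  have hq0 : 0 < n / (b * b) := by nlinarith
  rw [halt]
  refine ⟨hq0, ?_, b, by omega, hq⟩
  intro x hx
  by_contra hxu
  have hx0 : x ≠ 0 := by
    rintro rfl
    have h0 : n / (b * b) = 0 := zero_dvd_iff.mp (by simpa using hx)
    rw [h0] at hq
    nlinarith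
  have hx2 : 2 ≤ (x.natAbs : ℤ) := by
    have : x.natAbs ≠ 1 := fun h1 => hxu (Int.isUnit_iff.mpr (by omega))
    omega
  have hxx : (x.natAbs : ℤ) * x.natAbs ∣ n / (b * b) := by
    rw [Int.natAbs_mul_self']; exact hx
  have hjd : (b * x.natAbs) * (b * x.natAbs) ∣ n := by
    obtain ⟨t, ht⟩ := hxx
    exact ⟨t, by rw [← hq, ht]; ring⟩
  have := h4 (b * x.natAbs) (by nlinarith) hjd
  nlinarith

-- ===== VERDICT (by name: the statement is the Claim_ definition above) =====
theorem minimo_multiplicador_spec : Claim_equal_minimo_multiplicador := by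
  intro n _
  unfold Spec_minimo_multiplicador
  by_cases hn : n ≤ 1
  · rw [minimo_multiplicador, mmLoop, minimo_multiplicador_alt]
    rw [dif_neg (by omega), if_neg (by omega), if_pos hn]
  · have hn2 : 2 ≤ n := by omega
    obtain ⟨r, hPr, hr⟩ := mmLoop_P n 2 1 (by omega) (by omega)
      (fun j h2 hj _ => absurd (lt_of_lt_of_le hj h2) (lt_irrefl j))
    rw [minimo_multiplicador, hr, one_mul]
    exact pvP_unique n r _ hPr (alt_P n hn2)
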